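-- pv_equiv track=rewrite | github.com/EmelyashchenkovaEA/Lab_2 | main.py | mistakes_detection
-- ===== SOURCE A (Python) =====
-- def mistakes_detection(numb_sent, mistakes):
--
--     mistakes_checker = []
--
--     mis = []
--
--     for i in range(len(numb_sent)):
--
--         mistakes_checker.append(mistakes[numb_sent[i]])
--
--         mis.append([])
--
--         for j in range(6):
--
--             start = 2 ** j - 1
--
--             stop = 2 * 2 ** j - 1
--
--             line_sum = 0
--
--             while start < (len(str(mistakes_checker[i]))):
--
--                 arr = [int(i) for i in mistakes_checker[i][start:stop]]
--
--                 line_sum += sum(arr)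
--
--                 start = stop + 2 ** j
--
--                 stop = start + 2 ** j
--
--             mis[i].append(line_sum % 2)
--
--     results = []
--
--     for i in range(len(mis)):
--
--         result = 0
--
--         for j in reversed(range(6)):
--
--             result += mis[i][j] * 2 ** j
--
--         results.append(result - 1)
--
--     return results
-- ===== SOURCE B (Python) =====
-- def mistakes_detection(numb_sent, mistakes):
--     results = []
--     for k in numb_sent:
--         s0 = s1 = s2 = s3 = s4 = s5 = 0
--         for p, ch in enumerate(mistakes[k]):
--             m = (p + 1) % 64
--             if m:
--                 d = int(ch)
--                 if m & 1: s0 += d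
--                 if m & 2: s1 += d
--                 if m & 4: s2 += d
--                 if m & 8: s3 += d
--                 if m & 16: s4 += d
--                 if m & 32: s5 += d
--         results.append(s0 % 2 + s1 % 2 * 2 + s2 % 2 * 4 + s3 % 2 * 8 + s4 % 2 * 16 + s5 % 2 * 32 - 1)
--     return results
-- ===== Notes on version B (the rewrite author's own statement) =====
-- stated objective: faster
-- what changed: B replaces A's six strided-slice passes per string (a while-loop of slices and per-slice int() list comprehensions for each parity group, plus a separate bit-reassembly loop) by a single enumerate pass that converts each digit once and adds it to six unrolled parity accumulators selected by the bits of the 1-based position.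
import Mathlib
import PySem

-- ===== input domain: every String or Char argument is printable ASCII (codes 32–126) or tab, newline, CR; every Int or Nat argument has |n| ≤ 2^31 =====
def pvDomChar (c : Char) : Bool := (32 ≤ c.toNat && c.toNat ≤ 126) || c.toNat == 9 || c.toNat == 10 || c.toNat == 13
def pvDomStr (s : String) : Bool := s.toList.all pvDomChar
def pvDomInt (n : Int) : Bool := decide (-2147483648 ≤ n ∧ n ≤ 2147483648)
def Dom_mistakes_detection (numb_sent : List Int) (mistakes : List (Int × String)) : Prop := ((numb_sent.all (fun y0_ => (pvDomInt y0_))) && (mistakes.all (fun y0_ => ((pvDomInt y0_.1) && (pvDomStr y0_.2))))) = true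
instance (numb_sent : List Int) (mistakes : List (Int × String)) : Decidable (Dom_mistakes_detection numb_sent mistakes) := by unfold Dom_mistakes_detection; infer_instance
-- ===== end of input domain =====

-- B replaces A's six strided-slice passes per string by a single enumerate pass with six unrolled
-- parity accumulators (objective: faster, constant factor; return value only, nothing is mutated)

-- ===== PORT A =====
-- int(ch) for a 1-char string; Pre_ guarantees the char is a digit, so the default is never taken
def digA (c : Char) : Int := (PySem.Int.ofChars? [c]).getD 0

-- the inner `while start < len(...)` loop of A for group j; A keeps stop = start + 2**j at every
-- loop head (stop is initialised to 2*2**j - 1 = start + 2**j and each update sets stop to the new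
-- start + 2**j), so stop is carried implicitly as start + 2^j
def lineSumLoopA (s : List Char) (j : Nat) (start : Nat) : Int :=
  if start < s.length then
    ((PySem.List.slice s (some (start : Int)) (some ((start + 2 ^ j : Nat) : Int))).map digA).sum
      + lineSumLoopA s j (start + 2 ^ j + 2 ^ j)
  else 0
  termination_by s.length - start
  decreasing_by
    have h1 : 1 ≤ 2 ^ j := Nat.one_le_two_pow
    omega

def mistakes_detection (numb_sent : List Int) (mistakes : List (Int × String)) : List Int :=
  let d := PySem.Dict.ofList mistakes
  let mis := (List.range numb_sent.length).map (fun i =>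
    let s := (d.get? (numb_sent.getD i 0)).getD ""
    (List.range 6).map (fun j => PySem.Int.mod (lineSumLoopA s.toList j (2 ^ j - 1)) 2))
  (List.range mis.length).map (fun i =>
    ((List.range 6).reverse.foldl
      (fun result j => result + ((mis.getD i []).getD j 0) * (2 : Int) ^ j) 0) - 1)

-- ===== PORT B =====
def mistakes_detection_alt (numb_sent : List Int) (mistakes : List (Int × String)) : List Int :=
  let d := PySem.Dict.ofList mistakes
  numb_sent.map (fun k =>
    let s := (d.get? k).getD ""
    let st := (PySem.List.enumerate s.toList 0).foldl
      (fun (st : Int × Int × Int × Int × Int × Int) pc =>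
        let m := PySem.Int.mod (pc.1 + 1) 64
        if m ≠ 0 then
          let dv := digA pc.2
          (if PySem.Int.band m 1 ≠ 0 then st.1 + dv else st.1,
           if PySem.Int.band m 2 ≠ 0 then st.2.1 + dv else st.2.1,
           if PySem.Int.band m 4 ≠ 0 then st.2.2.1 + dv else st.2.2.1,
           if PySem.Int.band m 8 ≠ 0 then st.2.2.2.1 + dv else st.2.2.2.1,
           if PySem.Int.band m 16 ≠ 0 then st.2.2.2.2.1 + dv else st.2.2.2.2.1,
           if PySem.Int.band m 32 ≠ 0 then st.2.2.2.2.2 + dv else st.2.2.2.2.2)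
        else st)
      (0, 0, 0, 0, 0, 0)
    PySem.Int.mod st.1 2 + PySem.Int.mod st.2.1 2 * 2 + PySem.Int.mod st.2.2.1 2 * 4
      + PySem.Int.mod st.2.2.2.1 2 * 8 + PySem.Int.mod st.2.2.2.2.1 2 * 16
      + PySem.Int.mod st.2.2.2.2.2 2 * 32 - 1)

-- ===== PRECONDITION & SPEC =====
-- Pre_ = exactly the inputs on which the Python A returns: every requested sentence number is a key
-- of the dict (else KeyError), and in each selected string every char at 0-based position p with
-- (p+1) % 64 ≠ 0 (i.e. in some of the six parity groups) is a digit (else int() raises ValueError)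
def Pre_mistakes_detection (numb_sent : List Int) (mistakes : List (Int × String)) : Prop :=
  ∀ x ∈ numb_sent,
    (((PySem.Dict.ofList mistakes).get? x).isSome = true) ∧
    (∀ p < (((PySem.Dict.ofList mistakes).get? x).getD "").toList.length,
      (p + 1) % 64 ≠ 0 →
        ((((PySem.Dict.ofList mistakes).get? x).getD "").toList.getD p ' ').isDigit = true)
instance (numb_sent : List Int) (mistakes : List (Int × String)) : Decidable (Pre_mistakes_detection numb_sent mistakes) := by unfold Pre_mistakes_detection; infer_instance

def pvWitness_mistakes_detection : List Int × (List (Int × String)) :=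
  ([0, 1], [(0, "1011"), (1, "0110011")])

def Spec_mistakes_detection (numb_sent : List Int) (mistakes : List (Int × String)) (out : List Int) : Prop := out = mistakes_detection_alt numb_sent mistakes
instance (numb_sent : List Int) (mistakes : List (Int × String)) (out : List Int) : Decidable (Spec_mistakes_detection numb_sent mistakes out) := by unfold Spec_mistakes_detection; infer_instance

-- ===== CLAIM (what is proved, stated in full; the proofs are below) =====
def Claim_equal_mistakes_detection : Prop := ∀ (numb_sent : List Int) (mistakes : List (Int × String)), Dom_mistakes_detection numb_sent mistakes → Pre_mistakes_detection numb_sent mistakes → Spec_mistakes_detection numb_sent mistakes (mistakes_detection numb_sent mistakes)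

-- ===== LEMMAS AND PROOFS =====

-- the common per-group spec: Tspec j r cs = contribution of the chars of cs, sitting at absolute
-- 0-based positions r, r+1, …, to parity group j (position p is in group j iff bit j of p+1 is set)
def Tspec (j : Nat) (r : Nat) : List Char → Int
  | [] => 0
  | c :: cs => (if ((r + 1) / 2 ^ j) % 2 = 1 then digA c else 0) + Tspec j (r + 1) cs

theorem Tspec_nil (j r : Nat) : Tspec j r [] = 0 := rfl

theorem Tspec_append (j : Nat) (xs ys : List Char) (r : Nat) :
    Tspec j r (xs ++ ys) = Tspec j r xs + Tspec j (r + xs.length) ys := by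
  induction xs generalizing r with
  | nil => simp [Tspec]
  | cons c cs ih =>
      simp only [List.cons_append, Tspec, ih (r + 1), List.length_cons]
      ring_nf

theorem Tspec_all_true (j : Nat) (w : List Char) (r : Nat)
    (h : ∀ i < w.length, ((r + i + 1) / 2 ^ j) % 2 = 1) :
    Tspec j r w = (w.map digA).sum := by
  induction w generalizing r with
  | nil => simp [Tspec]
  | cons c cs ih =>
      have h0 := h 0 (by simp)
      simp only [Tspec, List.map_cons, List.sum_cons]
      rw [if_pos (by simpa using h0), ih (r + 1) (fun i hi => by
        have := h (i + 1) (by simpa using Nat.succ_lt_succ hi)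
        simpa [Nat.add_assoc, Nat.add_comm, Nat.add_left_comm] using this)]

theorem Tspec_all_false (j : Nat) (w : List Char) (r : Nat)
    (h : ∀ i < w.length, ¬ ((r + i + 1) / 2 ^ j) % 2 = 1) :
    Tspec j r w = 0 := by
  induction w generalizing r with
  | nil => simp [Tspec]
  | cons c cs ih =>
      have h0 := h 0 (by simp)
      simp only [Tspec]
      rw [if_neg (by simpa using h0), ih (r + 1) (fun i hi => by
        have := h (i + 1) (by simpa using Nat.succ_lt_succ hi)
        simpa [Nat.add_assoc, Nat.add_comm, Nat.add_left_comm] using this)]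
      ring

theorem phase_true (j start i : Nat) (hs : start % (2 * 2 ^ j) = 2 ^ j - 1) (hi : i < 2 ^ j) :
    ((start + i + 1) / 2 ^ j) % 2 = 1 := by
  have he : 1 ≤ 2 ^ j := Nat.one_le_two_pow
  have hdm := Nat.div_add_mod start (2 * 2 ^ j)
  set m := start / (2 * 2 ^ j) with hmdef
  have h2 : (1 + 2 * m) * 2 ^ j = 2 ^ j + 2 * 2 ^ j * m := by ring
  have h1 : start + i + 1 = i + (1 + 2 * m) * 2 ^ j := by omega
  rw [h1, Nat.add_mul_div_right _ _ (by omega : 0 < 2 ^ j), Nat.div_eq_of_lt hi]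
  omega

theorem phase_false (j start i : Nat) (hs : start % (2 * 2 ^ j) = 2 ^ j - 1)
    (hil : 2 ^ j ≤ i) (hi2 : i < 2 * 2 ^ j) :
    ¬ ((start + i + 1) / 2 ^ j) % 2 = 1 := by
  have he : 1 ≤ 2 ^ j := Nat.one_le_two_pow
  have hdm := Nat.div_add_mod start (2 * 2 ^ j)
  set m := start / (2 * 2 ^ j) with hmdef
  have h2 : (2 + 2 * m) * 2 ^ j = 2 ^ j + 2 ^ j + 2 * 2 ^ j * m := by ring
  have h1 : start + i + 1 = (i - 2 ^ j) + (2 + 2 * m) * 2 ^ j := by omega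
  rw [h1, Nat.add_mul_div_right _ _ (by omega : 0 < 2 ^ j), Nat.div_eq_of_lt (by omega)]
  omega

theorem lineSumLoopA_eq_Tspec (s : List Char) (j : Nat) (start : Nat)
    (hs : start % (2 * 2 ^ j) = 2 ^ j - 1) :
    lineSumLoopA s j start = Tspec j start (s.drop start) := by
  have he : 1 ≤ 2 ^ j := Nat.one_le_two_pow
  have hs0 := hs
  rw [lineSumLoopA]
  by_cases h : start < s.length
  · rw [if_pos h]
    have hslice : PySem.List.slice s (some (start : Int)) (some ((start + 2 ^ j : Nat) : Int))
        = (s.drop start).take (2 ^ j) := by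
      rw [PySem.List.slice_natCast]
      congr 1
      omega
    rw [hslice]
    set e := 2 ^ j with hedef
    set u := s.drop start with hudef
    have hulen : u.length = s.length - start := by simp [hudef]
    have hsplit : u = u.take e ++ u.drop e := (List.take_append_drop e u).symm
    rw [show Tspec j start u = Tspec j start (u.take e) + Tspec j (start + (u.take e).length) (u.drop e) by
      conv_lhs => rw [hsplit]
      exact Tspec_append j _ _ start]
    have htake_true : Tspec j start (u.take e) = ((u.take e).map digA).sum := by
      apply Tspec_all_true
      intro i hi
      exact phase_true j start i hs (by simp at hi; omega)
    rw [htake_true]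
    by_cases hc1 : u.length ≤ e
    · -- everything fits in the first block; both tails are empty
      have hd : u.drop e = [] := by rw [List.drop_eq_nil_iff]; omega
      rw [hd, Tspec_nil, lineSumLoopA]
      rw [if_neg (by omega)]
    · have htl : (u.take e).length = e := by simp; omega
      set v := u.drop e with hvdef
      have hvlen : v.length = u.length - e := by simp [hvdef]
      have hvsplit : v = v.take e ++ v.drop e := (List.take_append_drop e v).symm
      rw [htl, show Tspec j (start + e) v
            = Tspec j (start + e) (v.take e) + Tspec j (start + e + (v.take e).length) (v.drop e) by
        conv_lhs => rw [hvsplit]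
        exact Tspec_append j _ _ (start + e)]
      have hmid : Tspec j (start + e) (v.take e) = 0 := by
        apply Tspec_all_false
        intro i hi
        have hi' : i < e := by simp at hi; omega
        have := phase_false j start (e + i) hs (by omega) (by omega)
        simpa [Nat.add_assoc] using this
      rw [hmid]
      by_cases hc2 : u.length ≤ e + e
      · have hvd : v.drop e = [] := by rw [List.drop_eq_nil_iff]; omega
        rw [hvd, Tspec_nil, lineSumLoopA, if_neg (by omega)]
        ring
      · have hvtl : (v.take e).length = e := by simp; omega
        have hdd : v.drop e = s.drop (start + e + e) := by
          rw [hvdef, hudef, List.drop_drop, List.drop_drop]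
          congr 1
          omega
        rw [hvtl, hdd, ← lineSumLoopA_eq_Tspec s j (start + e + e) (by
            have hmm : (start + 2 * 2 ^ j * 1) % (2 * 2 ^ j) = start % (2 * 2 ^ j) :=
              Nat.add_mul_mod_self_left _ _ _
            have heq : start + e + e = start + 2 * 2 ^ j * 1 := by omega
            rw [heq, hmm, hs0])]
        ring
  · rw [if_neg h]
    rw [List.drop_eq_nil_of_le (by omega), Tspec_nil]
  termination_by s.length - start

theorem lineSumLoopA_total (s : List Char) (j : Nat) :
    lineSumLoopA s j (2 ^ j - 1) = Tspec j 0 s := by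
  have he : 1 ≤ 2 ^ j := Nat.one_le_two_pow
  have hsplit : s = s.take (2 ^ j - 1) ++ s.drop (2 ^ j - 1) := (List.take_append_drop _ s).symm
  rw [show Tspec j 0 s
        = Tspec j 0 (s.take (2 ^ j - 1)) + Tspec j (0 + (s.take (2 ^ j - 1)).length) (s.drop (2 ^ j - 1)) by
    conv_lhs => rw [hsplit]
    exact Tspec_append j _ _ 0]
  have hpre : Tspec j 0 (s.take (2 ^ j - 1)) = 0 := by
    apply Tspec_all_false
    intro i hi
    have h0 : (0 + i + 1) / 2 ^ j = 0 := Nat.div_eq_of_lt (by simp at hi; omega)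
    rw [h0]
    decide
  rw [hpre]
  by_cases hc : s.length ≤ 2 ^ j - 1
  · rw [List.drop_eq_nil_of_le (by omega), Tspec_nil, lineSumLoopA, if_neg (by omega)]
    ring
  · have hlen : (s.take (2 ^ j - 1)).length = 2 ^ j - 1 := by simp; omega
    rw [hlen, lineSumLoopA_eq_Tspec s j (2 ^ j - 1) (Nat.mod_eq_of_lt (by omega))]
    simp

theorem and_bits (M : Nat) (h : M < 64) :
    ((M &&& 1 ≠ 0) ↔ M % 2 = 1) ∧ ((M &&& 2 ≠ 0) ↔ M / 2 % 2 = 1) ∧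
    ((M &&& 4 ≠ 0) ↔ M / 4 % 2 = 1) ∧ ((M &&& 8 ≠ 0) ↔ M / 8 % 2 = 1) ∧
    ((M &&& 16 ≠ 0) ↔ M / 16 % 2 = 1) ∧ ((M &&& 32 ≠ 0) ↔ M / 32 % 2 = 1) := by
  revert h; revert M; decide

-- B's fold invariant: starting the enumerate at offset k with accumulators a0..a5, the fold adds
-- the six per-group contributions of the remaining chars
theorem foldB_inv (cs : List Char) (k : Nat) (a0 a1 a2 a3 a4 a5 : Int) :
    (PySem.List.enumerate cs (k : Int)).foldl
      (fun (st : Int × Int × Int × Int × Int × Int) pc =>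
        if PySem.Int.mod (pc.1 + 1) 64 ≠ 0 then
          (if PySem.Int.band (PySem.Int.mod (pc.1 + 1) 64) 1 ≠ 0 then st.1 + digA pc.2 else st.1,
           if PySem.Int.band (PySem.Int.mod (pc.1 + 1) 64) 2 ≠ 0 then st.2.1 + digA pc.2 else st.2.1,
           if PySem.Int.band (PySem.Int.mod (pc.1 + 1) 64) 4 ≠ 0 then st.2.2.1 + digA pc.2 else st.2.2.1,
           if PySem.Int.band (PySem.Int.mod (pc.1 + 1) 64) 8 ≠ 0 then st.2.2.2.1 + digA pc.2 else st.2.2.2.1,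
           if PySem.Int.band (PySem.Int.mod (pc.1 + 1) 64) 16 ≠ 0 then st.2.2.2.2.1 + digA pc.2 else st.2.2.2.2.1,
           if PySem.Int.band (PySem.Int.mod (pc.1 + 1) 64) 32 ≠ 0 then st.2.2.2.2.2 + digA pc.2 else st.2.2.2.2.2)
        else st)
      (a0, a1, a2, a3, a4, a5)
    = (a0 + Tspec 0 k cs, a1 + Tspec 1 k cs, a2 + Tspec 2 k cs,
       a3 + Tspec 3 k cs, a4 + Tspec 4 k cs, a5 + Tspec 5 k cs) := by
  induction cs generalizing k a0 a1 a2 a3 a4 a5 with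
  | nil => simp [PySem.List.enumerate_nil, Tspec]
  | cons c cs ih =>
      rw [PySem.List.enumerate_cons, List.foldl_cons]
      have hcast : (k : Int) + 1 = ((k + 1 : Nat) : Int) := by push_cast; ring
      have hmod : PySem.Int.mod ((k : Int) + 1) 64 = (((k + 1) % 64 : Nat) : Int) := by
        rw [hcast]
        exact_mod_cast PySem.Int.mod_natCast (k + 1) 64
      set M := (k + 1) % 64 with hMdef
      have hM64 : M < 64 := Nat.mod_lt _ (by norm_num)
      have hab := and_bits M hM64
      have hb1 : PySem.Int.band ((M : Nat) : Int) 1 = ((M &&& 1 : Nat) : Int) := by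
        exact_mod_cast PySem.Int.band_natCast M 1
      have hb2 : PySem.Int.band ((M : Nat) : Int) 2 = ((M &&& 2 : Nat) : Int) := by
        exact_mod_cast PySem.Int.band_natCast M 2
      have hb4 : PySem.Int.band ((M : Nat) : Int) 4 = ((M &&& 4 : Nat) : Int) := by
        exact_mod_cast PySem.Int.band_natCast M 4
      have hb8 : PySem.Int.band ((M : Nat) : Int) 8 = ((M &&& 8 : Nat) : Int) := by
        exact_mod_cast PySem.Int.band_natCast M 8
      have hb16 : PySem.Int.band ((M : Nat) : Int) 16 = ((M &&& 16 : Nat) : Int) := by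
        exact_mod_cast PySem.Int.band_natCast M 16
      have hb32 : PySem.Int.band ((M : Nat) : Int) 32 = ((M &&& 32 : Nat) : Int) := by
        exact_mod_cast PySem.Int.band_natCast M 32
      simp only [hmod, hb1, hb2, hb4, hb8, hb16, hb32]
      have hM : M = (k + 1) % 64 := hMdef
      obtain ⟨g1, g2, g4, g8, g16, g32⟩ := hab
      by_cases hz : M = 0
      · rw [if_neg (by simp [hz])]
        rw [hcast, ih]
        simp only [Tspec, pow_zero, pow_one, show (2:ℕ)^2 = 4 from rfl,
          show (2:ℕ)^3 = 8 from rfl, show (2:ℕ)^4 = 16 from rfl,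
          show (2:ℕ)^5 = 32 from rfl, Nat.div_one]
        rw [if_neg (by omega), if_neg (by omega), if_neg (by omega), if_neg (by omega),
            if_neg (by omega), if_neg (by omega)]
        simp
      · rw [if_pos (by simpa using hz)]
        rw [hcast, ih]
        have e1 : (((M &&& 1 : Nat) : Int) ≠ 0) ↔ (k + 1) % 2 = 1 := by
          rw [Nat.cast_ne_zero, g1]; omega
        have e2 : (((M &&& 2 : Nat) : Int) ≠ 0) ↔ (k + 1) / 2 % 2 = 1 := by
          rw [Nat.cast_ne_zero, g2]; omega
        have e4 : (((M &&& 4 : Nat) : Int) ≠ 0) ↔ (k + 1) / 4 % 2 = 1 := by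
          rw [Nat.cast_ne_zero, g4]; omega
        have e8 : (((M &&& 8 : Nat) : Int) ≠ 0) ↔ (k + 1) / 8 % 2 = 1 := by
          rw [Nat.cast_ne_zero, g8]; omega
        have e16 : (((M &&& 16 : Nat) : Int) ≠ 0) ↔ (k + 1) / 16 % 2 = 1 := by
          rw [Nat.cast_ne_zero, g16]; omega
        have e32 : (((M &&& 32 : Nat) : Int) ≠ 0) ↔ (k + 1) / 32 % 2 = 1 := by
          rw [Nat.cast_ne_zero, g32]; omega
        simp only [Tspec, pow_zero, pow_one, show (2:ℕ)^2 = 4 from rfl,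
          show (2:ℕ)^3 = 8 from rfl, show (2:ℕ)^4 = 16 from rfl,
          show (2:ℕ)^5 = 32 from rfl, Nat.div_one, e1, e2, e4, e8, e16, e32,
          Prod.mk.injEq]
        refine ⟨?_, ?_, ?_, ?_, ?_, ?_⟩ <;> split_ifs <;> ring

-- a range-indexed map over a list is a plain map
theorem map_range_getD {α β : Type} (xs : List α) (d : α) (h : α → β) :
    (List.range xs.length).map (fun i => h (xs.getD i d)) = xs.map h := by
  induction xs with
  | nil => simp
  | cons x t ih =>
      rw [List.length_cons, List.range_succ_eq_map, List.map_cons, List.map_map]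
      simpa using congrArg (List.cons (h x)) (by simpa using ih)

-- per selected string, A's bit-reassembly foldl over its six group parities equals B's closed sum
theorem perString (s : List Char) :
    ((List.range 6).reverse.foldl
      (fun result j =>
        result + (((List.range 6).map
            (fun j => PySem.Int.mod (lineSumLoopA s j (2 ^ j - 1)) 2)).getD j 0) * (2 : Int) ^ j) 0) - 1
    = PySem.Int.mod (Tspec 0 0 s) 2 + PySem.Int.mod (Tspec 1 0 s) 2 * 2
      + PySem.Int.mod (Tspec 2 0 s) 2 * 4 + PySem.Int.mod (Tspec 3 0 s) 2 * 8
      + PySem.Int.mod (Tspec 4 0 s) 2 * 16 + PySem.Int.mod (Tspec 5 0 s) 2 * 32 - 1 := by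
  have t0 : lineSumLoopA s 0 0 = Tspec 0 0 s := by
    have := lineSumLoopA_total s 0; norm_num at this; exact this
  have t1 : lineSumLoopA s 1 1 = Tspec 1 0 s := by
    have := lineSumLoopA_total s 1; norm_num at this; exact this
  have t2 : lineSumLoopA s 2 3 = Tspec 2 0 s := by
    have := lineSumLoopA_total s 2; norm_num at this; exact this
  have t3 : lineSumLoopA s 3 7 = Tspec 3 0 s := by
    have := lineSumLoopA_total s 3; norm_num at this; exact this
  have t4 : lineSumLoopA s 4 15 = Tspec 4 0 s := by
    have := lineSumLoopA_total s 4; norm_num at this; exact this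
  have t5 : lineSumLoopA s 5 31 = Tspec 5 0 s := by
    have := lineSumLoopA_total s 5; norm_num at this; exact this
  have hr : (List.range 6) = [0, 1, 2, 3, 4, 5] := rfl
  rw [hr]
  norm_num [List.foldl, List.getD, t0, t1, t2, t3, t4, t5]
  ring

theorem main_eq (numb_sent : List Int) (mistakes : List (Int × String)) :
    mistakes_detection numb_sent mistakes = mistakes_detection_alt numb_sent mistakes := by
  simp only [mistakes_detection, mistakes_detection_alt]
  rw [List.length_map, List.length_range]
  rw [← map_range_getD numb_sent (0 : Int)]
  apply List.map_congr_left
  intro i hi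
  have hi' : i < numb_sent.length := List.mem_range.mp hi
  rw [PySem.List.getD_map_range _ _ _ _ hi']
  set s := ((PySem.Dict.ofList mistakes).get? (numb_sent.getD i 0)).getD "" with hsdef
  have hfb := foldB_inv s.toList 0 0 0 0 0 0 0
  simp only [Nat.cast_zero, zero_add] at hfb
  rw [hfb]
  exact perString s.toList

-- ===== VERDICT (by name: the statement is the Claim_ definition above) =====
theorem mistakes_detection_spec : Claim_equal_mistakes_detection := by
  intro numb_sent mistakes _ _
  exact main_eq numb_sent mistakes
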